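-- pv_equiv track=rewrite | github.com/DivyG007/inlp-assignments | Tokenization&Language-Modeling/language_models.py | build_context_stats
-- ===== SOURCE A (Python) =====
-- from collections import Counter
--
-- def build_context_stats(ngram_counts, n):
--     context_counts = Counter()
--     continuation_types = Counter()
--     seen = {}
--     for ngram, count in ngram_counts[n].items():
--         context = ngram[:-1]
--         context_counts[context] += count
--         if context not in seen:
--             seen[context] = set()
--         seen[context].add(ngram[-1])
--     for context, cont_set in seen.items():
--         continuation_types[context] = len(cont_set)
--     return context_counts, continuation_types
-- ===== SOURCE B (Python) =====
-- from collections import Counter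
--
-- def build_context_stats(ngram_counts, n):
--     # Single pass: ngram keys of a dict are unique, so each (context, last-token)
--     # pair occurs once; counting contexts directly equals counting distinct continuations.
--     context_counts = Counter()
--     continuation_types = Counter()
--     for ngram, count in ngram_counts[n].items():
--         context = ngram[:-1]
--         context_counts[context] += count
--         continuation_types[context] += 1
--     return context_counts, continuation_types
-- ===== Notes on version B (the rewrite author's own statement) =====
-- stated objective: simpler
-- what changed: One pass instead of two: the dict-of-sets 'seen' and the second loop are dropped; since dict keys are unique every (context, last-token) pair is distinct, so continuation_types is incremented by 1 per ngram directly.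
import Mathlib
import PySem

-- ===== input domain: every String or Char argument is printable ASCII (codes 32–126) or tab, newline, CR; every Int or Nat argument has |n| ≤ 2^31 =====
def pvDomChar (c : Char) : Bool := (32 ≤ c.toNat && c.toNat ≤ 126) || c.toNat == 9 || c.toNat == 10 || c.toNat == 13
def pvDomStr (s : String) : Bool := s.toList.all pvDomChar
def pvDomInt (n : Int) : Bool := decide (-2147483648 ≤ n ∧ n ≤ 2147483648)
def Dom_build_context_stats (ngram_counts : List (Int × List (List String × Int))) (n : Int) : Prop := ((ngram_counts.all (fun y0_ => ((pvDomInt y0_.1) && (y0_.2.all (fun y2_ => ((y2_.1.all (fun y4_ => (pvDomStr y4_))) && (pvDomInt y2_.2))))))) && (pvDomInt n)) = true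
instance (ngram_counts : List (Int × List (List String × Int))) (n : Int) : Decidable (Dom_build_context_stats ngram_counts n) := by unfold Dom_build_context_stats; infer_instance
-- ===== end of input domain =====

-- B drops A's dict-of-sets `seen` and A's second loop: each dict key is unique, so every
-- (context, last-token) pair is distinct and continuation_types can be counted +1 in the single pass.
-- Equivalence is about the RETURN value (neither version mutates its arguments).

-- ===== PORT A =====
-- context = ngram[:-1]
def pvCtx (p : List String × Int) : List String := PySem.List.slice p.1 none (some (-1))
-- ngram[-1]; the IndexError on an empty ngram is excluded by Pre_, default "" unused inside Pre_
def pvLast (p : List String × Int) : String := PySem.List.pyGetD p.1 (-1) ""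

-- loop body of A's first loop
def pvStepA (st : PySem.Dict (List String) Int × PySem.Dict (List String) (PySem.Set String))
    (p : List String × Int) :
    PySem.Dict (List String) Int × PySem.Dict (List String) (PySem.Set String) :=
  let context := pvCtx p
  let cc := st.1.modify context 0 (· + p.2)                          -- context_counts[context] += count
  let seen := if st.2.contains context then st.2                     -- if context not in seen: seen[context] = set()
              else st.2.insert context PySem.Set.empty
  let seen := seen.modify context PySem.Set.empty (fun s => s.add (pvLast p))  -- seen[context].add(ngram[-1])
  (cc, seen)

def build_context_stats (ngram_counts : List (Int × List (List String × Int))) (n : Int) :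
    List (List (List String × Int)) :=
  let items := ((PySem.Dict.mk ngram_counts).get? n).getD []         -- ngram_counts[n]; KeyError excluded by Pre_
  let st := items.foldl pvStepA (PySem.Dict.empty, PySem.Dict.empty)
  -- second loop: for context, cont_set in seen.items(): continuation_types[context] = len(cont_set)
  let continuation_types := st.2.items.foldl
      (fun (ct : PySem.Dict (List String) Int) q => ct.insert q.1 (PySem.Set.len q.2))
      PySem.Dict.empty
  [st.1.items, continuation_types.items]

-- ===== PORT B =====
-- single loop body of B: count the context and count the ngram (one distinct continuation each)
def pvStepB (st : PySem.Dict (List String) Int × PySem.Dict (List String) Int)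
    (p : List String × Int) :
    PySem.Dict (List String) Int × PySem.Dict (List String) Int :=
  let context := PySem.List.slice p.1 none (some (-1))
  (st.1.modify context 0 (· + p.2), st.2.modify context 0 (· + 1))

def build_context_stats_alt (ngram_counts : List (Int × List (List String × Int))) (n : Int) :
    List (List (List String × Int)) :=
  let items := ((PySem.Dict.mk ngram_counts).get? n).getD []
  let st := items.foldl pvStepB (PySem.Dict.empty, PySem.Dict.empty)
  [st.1.items, st.2.items]

-- ===== PRECONDITION & SPEC =====
-- Pre_ excludes: (KeyError) n not a key of ngram_counts; (IndexError) an empty ngram in the selected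
-- inner list; and inner association lists with duplicate ngram keys, which do not represent a Python dict.
def Pre_build_context_stats (ngram_counts : List (Int × List (List String × Int))) (n : Int) : Prop :=
  ((PySem.Dict.mk ngram_counts).get? n).isSome = true ∧
  (((((PySem.Dict.mk ngram_counts).get? n).getD []).map Prod.fst).Nodup) ∧
  ∀ p ∈ (((PySem.Dict.mk ngram_counts).get? n).getD []), p.1 ≠ []
instance (ngram_counts : List (Int × List (List String × Int))) (n : Int) : Decidable (Pre_build_context_stats ngram_counts n) := by unfold Pre_build_context_stats; infer_instance

def pvWitness_build_context_stats : (List (Int × List (List String × Int))) × Int :=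
  ([(2, [(["a", "b"], 3), (["a", "c"], 2), (["x", "b"], 1)])], 2)

def Spec_build_context_stats (ngram_counts : List (Int × List (List String × Int))) (n : Int) (out : List (List (List String × Int))) : Prop := out = build_context_stats_alt ngram_counts n
instance (ngram_counts : List (Int × List (List String × Int))) (n : Int) (out : List (List (List String × Int))) : Decidable (Spec_build_context_stats ngram_counts n out) := by unfold Spec_build_context_stats; infer_instance

-- ===== CLAIM (what is proved, stated in full; the proofs are below) =====
def Claim_equal_build_context_stats : Prop := ∀ (ngram_counts : List (Int × List (List String × Int))) (n : Int), Dom_build_context_stats ngram_counts n → Pre_build_context_stats ngram_counts n → Spec_build_context_stats ngram_counts n (build_context_stats ngram_counts n)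

-- ===== LEMMAS AND PROOFS =====

-- the value stored for a context in B's continuation counter mirrors the size of A's continuation set
def pvLen (r : List String × PySem.Set String) : List String × Int := (r.1, PySem.Set.len r.2)

lemma pv_stepA_snd (st : PySem.Dict (List String) Int × PySem.Dict (List String) (PySem.Set String))
    (p : List String × Int) :
    (pvStepA st p).2
      = st.2.insert (pvCtx p) ((st.2.getD (pvCtx p) PySem.Set.empty).add (pvLast p)) := by
  by_cases h : st.2.contains (pvCtx p) = true
  · simp [pvStepA, PySem.Dict.modify, h]
  · simp only [Bool.not_eq_true] at h
    simp [pvStepA, PySem.Dict.modify, h, PySem.Dict.getD_insert_self,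
      PySem.Dict.insert_insert_self, PySem.Dict.getD_of_not_contains _ _ h]

lemma pv_len_add (s : PySem.Set String) (l : String) (h : l ∉ s) :
    PySem.Set.len (s.add l) = PySem.Set.len s + 1 := by
  simp [PySem.Set.add, PySem.Set.len, h]

lemma pv_fst_eq (q : List (List String × Int)) (cc : PySem.Dict (List String) Int)
    (seen : PySem.Dict (List String) (PySem.Set String)) (ct : PySem.Dict (List String) Int) :
    (q.foldl pvStepA (cc, seen)).1 = (q.foldl pvStepB (cc, ct)).1 := by
  induction q generalizing cc seen ct with
  | nil => rfl
  | cons p q ih =>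
    simp only [List.foldl_cons]
    exact ih _ _ _

lemma pv_snd_eq (q : List (List String × Int)) (cc ccB : PySem.Dict (List String) Int)
    (seen : PySem.Dict (List String) (PySem.Set String)) (ct : PySem.Dict (List String) Int)
    (hnd : seen.keys.Nodup)
    (hmir : ct.items = seen.items.map pvLen)
    (hfresh : ∀ p ∈ q, ∀ s, seen.get? (pvCtx p) = some s → pvLast p ∉ s)
    (hpairs : (q.map (fun p => (pvCtx p, pvLast p))).Nodup) :
    (q.foldl pvStepB (ccB, ct)).2.items = (q.foldl pvStepA (cc, seen)).2.items.map pvLen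
    ∧ (q.foldl pvStepA (cc, seen)).2.keys.Nodup := by
  induction q generalizing cc ccB seen ct with
  | nil => exact ⟨hmir.symm ▸ rfl, hnd⟩
  | cons p q ih =>
    simp only [List.foldl_cons]
    have hkeys : ct.keys = seen.keys := by
      simp [PySem.Dict.keys, hmir, pvLen, Function.comp]
    have hcontains : ct.contains (pvCtx p) = seen.contains (pvCtx p) := by
      by_cases h : pvCtx p ∈ seen.keys
      · rw [(PySem.Dict.contains_iff_mem_keys _ _).mpr h,
          (PySem.Dict.contains_iff_mem_keys _ _).mpr (hkeys ▸ h)]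
      · have h1 : seen.contains (pvCtx p) = false := by
          cases hc : seen.contains (pvCtx p)
          · rfl
          · exact absurd ((PySem.Dict.contains_iff_mem_keys _ _).mp hc) h
        have h2 : ct.contains (pvCtx p) = false := by
          cases hc : ct.contains (pvCtx p)
          · rfl
          · exact absurd (hkeys ▸ (PySem.Dict.contains_iff_mem_keys _ _).mp hc) h
        rw [h1, h2]
    have hstepB : (pvStepB (ccB, ct) p).2
        = ct.insert (pvCtx p) (ct.getD (pvCtx p) 0 + 1) := rfl
    have hstepA := pv_stepA_snd (cc, seen) p
    have hpairs' : (q.map (fun p => (pvCtx p, pvLast p))).Nodup :=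
      (List.nodup_cons.mp hpairs).2
    have hheadpair : (pvCtx p, pvLast p) ∉ q.map (fun p => (pvCtx p, pvLast p)) :=
      (List.nodup_cons.mp hpairs).1
    by_cases hc : seen.contains (pvCtx p) = true
    · -- context already seen: both dicts are updated in place
      obtain ⟨s, hs⟩ : ∃ s, seen.get? (pvCtx p) = some s := by
        have := PySem.Dict.contains_eq_isSome_get? (d := seen) (k := pvCtx p)
        rw [hc] at this
        exact Option.isSome_iff_exists.mp this.symm
      have hsD : seen.getD (pvCtx p) PySem.Set.empty = s :=
        PySem.Dict.getD_of_get?_eq_some _ _ hs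
      have hnotmem : pvLast p ∉ s := hfresh p (List.mem_cons_self) s hs
      have hmemA : (pvCtx p, s) ∈ seen.items := PySem.Dict.mem_items_of_get?_eq_some _ hs
      have hctD : ct.getD (pvCtx p) 0 = PySem.Set.len s := by
        have hmemB : (pvCtx p, PySem.Set.len s) ∈ ct.items := by
          rw [hmir]
          exact List.mem_map.mpr ⟨(pvCtx p, s), hmemA, rfl⟩
        exact PySem.Dict.getD_of_mem_items _ hmemB (hkeys ▸ hnd) 0
      have hseen' : (pvStepA (cc, seen) p).2 = seen.insert (pvCtx p) (s.add (pvLast p)) := by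
        rw [hstepA, hsD]
      have hmir' : (ct.insert (pvCtx p) (ct.getD (pvCtx p) 0 + 1)).items
          = (seen.insert (pvCtx p) (s.add (pvLast p))).items.map pvLen := by
        rw [PySem.Dict.items_insert_of_contains _ _ hc,
          PySem.Dict.items_insert_of_contains _ _ (hcontains.trans hc), hmir,
          hctD, List.map_map, List.map_map]
        refine List.map_congr_left (fun r _ => ?_)
        by_cases hr : r.1 = pvCtx p
        · have hlen := pv_len_add s (pvLast p) hnotmem
          simp [PySem.Set.len] at hlen
          simp [pvLen, hr, PySem.Set.len, hlen]
        · simp [pvLen, hr]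
      have hnd' : (seen.insert (pvCtx p) (s.add (pvLast p))).keys.Nodup := by
        rw [PySem.Dict.keys_insert_of_contains _ _ hc]; exact hnd
      have hfresh' : ∀ p' ∈ q, ∀ t,
          (seen.insert (pvCtx p) (s.add (pvLast p))).get? (pvCtx p') = some t → pvLast p' ∉ t := by
        intro p' hp' t ht hmem
        by_cases he : pvCtx p' = pvCtx p
        · rw [he, PySem.Dict.get?_insert_self] at ht
          cases ht
          rcases (PySem.Set.mem_add _ _ _).mp hmem with h1 | h1
          · exact hfresh p' (List.mem_cons_of_mem _ hp') s (he ▸ hs) h1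
          · exact hheadpair (List.mem_map.mpr ⟨p', hp', by rw [he, h1]⟩)
        · rw [PySem.Dict.get?_insert_of_ne _ _ he] at ht
          exact hfresh p' (List.mem_cons_of_mem _ hp') t ht hmem
      exact ih (pvStepA (cc, seen) p).1 (pvStepB (ccB, ct) p).1
        (pvStepA (cc, seen) p).2 (pvStepB (ccB, ct) p).2
        (by rw [hseen']; exact hnd')
        (by rw [hseen', hstepB]; exact hmir')
        (by rw [hseen']; exact hfresh') hpairs'
    · -- new context: both dicts append a fresh key
      simp only [Bool.not_eq_true] at hc
      have hcB : ct.contains (pvCtx p) = false := hcontains.trans hc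
      have hsD : seen.getD (pvCtx p) PySem.Set.empty = PySem.Set.empty :=
        PySem.Dict.getD_of_not_contains _ _ hc
      have hctD : ct.getD (pvCtx p) 0 = 0 := PySem.Dict.getD_of_not_contains _ _ hcB
      have hseen' : (pvStepA (cc, seen) p).2
          = seen.insert (pvCtx p) (PySem.Set.empty.add (pvLast p)) := by
        rw [hstepA, hsD]
      have hnotmemkeys : pvCtx p ∉ seen.keys := fun h =>
        by simp [(PySem.Dict.contains_iff_mem_keys seen (pvCtx p)).mpr h] at hc
      have hmir' : (ct.insert (pvCtx p) (ct.getD (pvCtx p) 0 + 1)).items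
          = (seen.insert (pvCtx p) (PySem.Set.empty.add (pvLast p))).items.map pvLen := by
        rw [PySem.Dict.items_insert_of_not_contains _ _ hc,
          PySem.Dict.items_insert_of_not_contains _ _ hcB, hmir, hctD, List.map_append]
        simp [pvLen, PySem.Set.add, PySem.Set.empty, PySem.Set.len]
      have hnd' : (seen.insert (pvCtx p) (PySem.Set.empty.add (pvLast p))).keys.Nodup := by
        rw [PySem.Dict.keys_insert_of_not_contains _ _ hc]
        simpa [List.nodup_append] using ⟨hnd, fun a ha heq => hnotmemkeys (heq ▸ ha)⟩
      have hfresh' : ∀ p' ∈ q, ∀ t,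
          (seen.insert (pvCtx p) (PySem.Set.empty.add (pvLast p))).get? (pvCtx p') = some t →
          pvLast p' ∉ t := by
        intro p' hp' t ht hmem
        by_cases he : pvCtx p' = pvCtx p
        · rw [he, PySem.Dict.get?_insert_self] at ht
          cases ht
          rcases (PySem.Set.mem_add _ _ _).mp hmem with h1 | h1
          · simp [PySem.Set.empty] at h1
          · exact hheadpair (List.mem_map.mpr ⟨p', hp', by rw [he, h1]⟩)
        · rw [PySem.Dict.get?_insert_of_ne _ _ he] at ht
          exact hfresh p' (List.mem_cons_of_mem _ hp') t ht hmem
      exact ih (pvStepA (cc, seen) p).1 (pvStepB (ccB, ct) p).1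
        (pvStepA (cc, seen) p).2 (pvStepB (ccB, ct) p).2
        (by rw [hseen']; exact hnd')
        (by rw [hseen', hstepB]; exact hmir')
        (by rw [hseen']; exact hfresh') hpairs'

lemma pv_ctx_eq (p : List String × Int) : pvCtx p = p.1.dropLast := by
  simp [pvCtx, pysem]

lemma pv_getLastD (xs : List String) (h : xs ≠ []) : xs.getLastD "" = xs.getLast h := by
  cases xs with
  | nil => exact absurd rfl h
  | cons a l => simp [List.getLastD_eq_getLast?, List.getLast?_eq_some_getLast]

lemma pv_last_eq (p : List String × Int) (h : p.1 ≠ []) : pvLast p = p.1.getLastD "" := by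
  unfold pvLast
  rw [PySem.List.pyGetD_neg_one p.1 "" h, pv_getLastD p.1 h]

-- the (context, last-token) pairs of a dict with nonempty ngram keys are pairwise distinct
lemma pv_pairs_nodup (items : List (List String × Int))
    (hnodup : (items.map Prod.fst).Nodup)
    (hne : ∀ p ∈ items, p.1 ≠ []) :
    (items.map (fun p => (pvCtx p, pvLast p))).Nodup := by
  have hmap : items.map (fun p => (pvCtx p, pvLast p))
      = (items.map Prod.fst).map (fun xs => (xs.dropLast, xs.getLastD "")) := by
    rw [List.map_map]
    refine List.map_congr_left (fun p hp => ?_)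
    simp [Function.comp, pv_ctx_eq, pv_last_eq p (hne p hp)]
  rw [hmap]
  refine List.Nodup.map_on ?_ hnodup
  intro xs hxs ys hys hxy
  obtain ⟨px, hpx, hpx1⟩ := List.mem_map.mp hxs
  obtain ⟨py, hpy, hpy1⟩ := List.mem_map.mp hys
  have hxne : xs ≠ [] := hpx1 ▸ hne px hpx
  have hyne : ys ≠ [] := hpy1 ▸ hne py hpy
  have h1 : xs.dropLast = ys.dropLast := congrArg Prod.fst hxy
  have h2 : xs.getLastD "" = ys.getLastD "" := congrArg Prod.snd hxy
  have hgx := pv_getLastD xs hxne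
  have hgy := pv_getLastD ys hyne
  calc xs = xs.dropLast ++ [xs.getLast hxne] := (List.dropLast_concat_getLast hxne).symm
    _ = ys.dropLast ++ [ys.getLast hyne] := by rw [h1, ← hgx, h2, hgy]
    _ = ys := List.dropLast_concat_getLast hyne

lemma pv_main (items : List (List String × Int))
    (hnodup : (items.map Prod.fst).Nodup)
    (hne : ∀ p ∈ items, p.1 ≠ []) :
    [(items.foldl pvStepA (PySem.Dict.empty, PySem.Dict.empty)).1.items,
     ((items.foldl pvStepA (PySem.Dict.empty, PySem.Dict.empty)).2.items.foldl
        (fun (ct : PySem.Dict (List String) Int) q => ct.insert q.1 (PySem.Set.len q.2))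
        PySem.Dict.empty).items]
    = [(items.foldl pvStepB (PySem.Dict.empty, PySem.Dict.empty)).1.items,
       (items.foldl pvStepB (PySem.Dict.empty, PySem.Dict.empty)).2.items] := by
  have h2 := pv_snd_eq items PySem.Dict.empty PySem.Dict.empty PySem.Dict.empty PySem.Dict.empty
    (by simp [PySem.Dict.keys, PySem.Dict.empty])
    (by rfl)
    (by intro p hp s hs; rw [PySem.Dict.get?_empty] at hs; cases hs)
    (pv_pairs_nodup items hnodup hne)
  have h1 := pv_fst_eq items PySem.Dict.empty PySem.Dict.empty PySem.Dict.empty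
  have hfold := PySem.Dict.items_foldl_insert_fresh
    ((items.foldl pvStepA (PySem.Dict.empty, PySem.Dict.empty)).2.items)
    (fun q => q.1) (fun q => PySem.Set.len q.2) PySem.Dict.empty
    (fun a _ => PySem.Dict.contains_empty a.1) h2.2
  rw [h1, hfold, h2.1]
  rfl

-- assemble: both programs read the same inner list and fold over it
theorem build_context_stats_spec : Claim_equal_build_context_stats := by
  intro ngc n _ hpre
  obtain ⟨hsome, hnodup, hne⟩ := hpre
  unfold Spec_build_context_stats build_context_stats build_context_stats_alt
  exact pv_main _ hnodup hne
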